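-- pv_equiv track=rewrite | github.com/ad-freiburg/tokenization-repair | scripts/ocr_postprocess.py | strip_token
-- ===== SOURCE A (Python) =====
-- def has_letter(token):
--     result = False
--     for char in token:
--         if char.isalpha():
--             return True
--     return False
--
-- def strip_token(token):
--     if not has_letter(token):
--         return "", token, ""
--     leading_symbols = 0
--     for i in range(len(token)):
--         if token[i].isalpha():
--             leading_symbols = i
--             break
--     trailing_symbols = 0
--     for i in range(len(token)):
--         if token[-i - 1].isalpha():
--             trailing_symbols = i
--             break
--     prefix = token[:leading_symbols]
--     suffix = "" if trailing_symbols == 0 else token[-trailing_symbols:]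
--     word = token[leading_symbols:(len(token) - trailing_symbols)]
--     return prefix, word, suffix
-- ===== SOURCE B (Python) =====
-- def strip_token(token):
--     bounds = None
--     for i, char in enumerate(token):
--         if char.isalpha():
--             bounds = ((bounds[0] if bounds is not None else i), i)
--     if bounds is None:
--         return "", token, ""
--     first, last = bounds
--     return token[:first], token[first:last + 1], token[last + 1:]
-- ===== Notes on version B (the rewrite author's own statement) =====
-- stated objective: alternative
-- what changed: Replaced A's three separate scans (has_letter check, forward scan for the first letter, backward scan over negative indices for the trailing count) by a single forward pass that maintains the first and last letter indices, then slices once.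
import Mathlib
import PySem

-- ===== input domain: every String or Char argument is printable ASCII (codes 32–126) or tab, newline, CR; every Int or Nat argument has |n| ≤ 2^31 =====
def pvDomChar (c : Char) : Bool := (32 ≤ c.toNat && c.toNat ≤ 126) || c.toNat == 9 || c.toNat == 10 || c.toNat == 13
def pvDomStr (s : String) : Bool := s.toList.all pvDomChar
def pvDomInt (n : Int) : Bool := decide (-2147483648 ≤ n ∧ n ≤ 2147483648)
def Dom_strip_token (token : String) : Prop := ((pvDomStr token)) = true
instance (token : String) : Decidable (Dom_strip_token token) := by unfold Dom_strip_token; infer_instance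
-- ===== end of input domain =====

-- B replaces A's three scans by one forward pass keeping first/last letter indices (alternative decomposition, same cost).

-- ===== PORT A =====
-- for char in token: if char.isalpha(): return True / return False
def pvHasLetter : List Char → Bool
  | [] => false
  | c :: rest => if PySem.Chars.isalpha c then true else pvHasLetter rest

-- the 'for i in range(len(token)) … break' loops: walk the chars keeping the index i,
-- return i at the first letter, and the initial 0 if the loop finishes without a break.
-- A's second loop reads token[-i-1] for i = 0,1,…, i.e. it walks token.reverse.
def pvFirstLoop : List Char → Nat → Nat
  | [], _ => 0
  | c :: rest, i => if PySem.Chars.isalpha c then i else pvFirstLoop rest (i + 1)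

def strip_token (token : String) : String × String × String :=
  let l := token.toList
  if pvHasLetter l = false then ("", token, "") else
  let leading : Nat := pvFirstLoop l 0
  let trailing : Nat := pvFirstLoop l.reverse 0
  let pref := PySem.List.slice l none (some (leading : Int))
  let suffix : List Char := if trailing = 0 then [] else PySem.List.slice l (some (-(trailing : Int))) none
  let word := PySem.List.slice l (some (leading : Int)) (some ((l.length : Int) - (trailing : Int)))
  (String.mk pref, String.mk word, String.mk suffix)

-- ===== PORT B =====
-- loop body: bounds = ((bounds[0] if bounds is not None else i), i) when char.isalpha()
def pvStepB (p : Option (Int × Int)) (e : Int × Char) : Option (Int × Int) :=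
  if PySem.Chars.isalpha e.2 then some ((match p with | some b => b.1 | none => e.1), e.1) else p

def strip_token_alt (token : String) : String × String × String :=
  let l := token.toList
  let bounds := (PySem.List.enumerate l 0).foldl pvStepB none
  match bounds with
  | none => ("", token, "")
  | some (first, last) =>
      (String.mk (PySem.List.slice l none (some first)),
       String.mk (PySem.List.slice l (some first) (some (last + 1))),
       String.mk (PySem.List.slice l (some (last + 1)) none))

-- ===== PRECONDITION & SPEC =====
def Spec_strip_token (token : String) (out : String × String × String) : Prop := out = strip_token_alt token
instance (token : String) (out : String × String × String) : Decidable (Spec_strip_token token out) := by unfold Spec_strip_token; infer_instance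

-- ===== CLAIM (what is proved, stated in full; the proofs are below) =====
def Claim_equal_strip_token : Prop := ∀ (token : String), Dom_strip_token token → Spec_strip_token token (strip_token token)

-- ===== LEMMAS AND PROOFS =====
-- index of the first letter (meaningful only when a letter exists)
def pvFirstA : List Char → Nat
  | [] => 0
  | c :: r => if PySem.Chars.isalpha c then 0 else pvFirstA r + 1

-- index of the last letter (meaningful only when a letter exists)
def pvLastA : List Char → Nat
  | [] => 0
  | _ :: r => if r.any PySem.Chars.isalpha then pvLastA r + 1 else 0

theorem pvHasLetter_eq_any (l : List Char) : pvHasLetter l = l.any PySem.Chars.isalpha := by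
  induction l with
  | nil => rfl
  | cons c r ih => by_cases h : PySem.Chars.isalpha c <;> simp [pvHasLetter, h, ih]

theorem pvFirstLoop_eq (l : List Char) (h : l.any PySem.Chars.isalpha) :
    ∀ i, pvFirstLoop l i = i + pvFirstA l := by
  induction l with
  | nil => simp at h
  | cons c r ih =>
      intro i
      by_cases hc : PySem.Chars.isalpha c
      · simp [pvFirstLoop, pvFirstA, hc]
      · have hr : r.any PySem.Chars.isalpha := by simpa [hc] using h
        simp [pvFirstLoop, pvFirstA, hc, ih hr]; omega

theorem pvLastA_lt (l : List Char) (h : l.any PySem.Chars.isalpha) : pvLastA l < l.length := by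
  induction l with
  | nil => simp at h
  | cons c r ih =>
      by_cases hr : r.any PySem.Chars.isalpha
      · have := ih hr; simp [pvLastA, hr]; omega
      · simp [pvLastA, hr]

theorem pvFirstA_append_single (xs : List Char) (c : Char) :
    pvFirstA (xs ++ [c]) =
      if xs.any PySem.Chars.isalpha then pvFirstA xs
      else if PySem.Chars.isalpha c then xs.length else xs.length + 1 := by
  induction xs with
  | nil => by_cases hc : PySem.Chars.isalpha c <;> simp [pvFirstA, hc]
  | cons x xs ih =>
      by_cases hx : PySem.Chars.isalpha x
      · simp [pvFirstA, hx]
      · rw [List.cons_append]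
        have h1 : pvFirstA (x :: (xs ++ [c])) = pvFirstA (xs ++ [c]) + 1 := by
          simp [pvFirstA, hx]
        have h2 : (x :: xs).any PySem.Chars.isalpha = xs.any PySem.Chars.isalpha := by
          simp [hx]
        rw [h1, ih, h2]
        by_cases hxs : xs.any PySem.Chars.isalpha
        · rw [if_pos hxs, if_pos hxs]; simp [pvFirstA, hx]
        · rw [if_neg hxs, if_neg hxs]
          by_cases hc : PySem.Chars.isalpha c
          · rw [if_pos hc, if_pos hc]; simp
          · rw [if_neg hc, if_neg hc]; simp

theorem pvFirstA_reverse (l : List Char) (h : l.any PySem.Chars.isalpha) :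
    pvFirstA l.reverse = l.length - 1 - pvLastA l := by
  induction l with
  | nil => simp at h
  | cons c r ih =>
      rw [show List.reverse (c :: r) = r.reverse ++ [c] by simp, pvFirstA_append_single]
      by_cases hr : r.any PySem.Chars.isalpha
      · have := pvLastA_lt r hr
        simp only [List.any_reverse, hr, if_true, ih hr, pvLastA, List.length_reverse,
          List.length_cons]
        omega
      · have hc : PySem.Chars.isalpha c := by simpa [hr] using h
        simp [hr, hc, pvLastA]

theorem pvFoldB_eq (l : List Char) : ∀ (i : Int) (p : Option (Int × Int)),
    (PySem.List.enumerate l i).foldl pvStepB p =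
      if l.any PySem.Chars.isalpha then
        some ((match p with | some b => b.1 | none => i + (pvFirstA l : Int)), i + (pvLastA l : Int))
      else p := by
  induction l with
  | nil => intro i p; simp [PySem.List.enumerate_nil]
  | cons c r ih =>
      intro i p
      rw [PySem.List.enumerate_cons, List.foldl_cons]
      by_cases hc : PySem.Chars.isalpha c
      · have hany : (c :: r).any PySem.Chars.isalpha = true := by simp [hc]
        rw [show pvStepB p (i, c) = some ((match p with | some b => b.1 | none => i), i) by
              simp [pvStepB, hc]]
        rw [ih (i + 1) _, hany, if_pos rfl]
        by_cases hr : r.any PySem.Chars.isalpha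
        · rw [if_pos hr]
          cases p <;> simp [pvFirstA, pvLastA, hc, hr] <;> omega
        · rw [if_neg (by simp [hr])]
          cases p <;> simp [pvFirstA, pvLastA, hc, hr]
      · rw [show pvStepB p (i, c) = p by simp [pvStepB, hc]]
        rw [ih (i + 1) p]
        by_cases hr : r.any PySem.Chars.isalpha
        · have hany : (c :: r).any PySem.Chars.isalpha = true := by simp [hr]
          rw [if_pos hr, hany, if_pos rfl]
          cases p <;> simp [pvFirstA, pvLastA, hc, hr] <;> omega
        · have hany : (c :: r).any PySem.Chars.isalpha = false := by simp [hc, hr]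
          rw [if_neg (by simp [hr]), hany, if_neg (by simp)]

-- ===== VERDICT (by name: the statement is the Claim_ definition above) =====
theorem strip_token_spec : Claim_equal_strip_token := by
  intro token _
  unfold Spec_strip_token strip_token strip_token_alt
  simp only [pvFoldB_eq, pvHasLetter_eq_any]
  by_cases h : (token.toList).any PySem.Chars.isalpha
  · have hlead : pvFirstLoop token.toList 0 = pvFirstA token.toList := by
      simpa using pvFirstLoop_eq token.toList h 0
    have hrevany : (token.toList.reverse).any PySem.Chars.isalpha = true := by simpa using h
    have htrail : pvFirstLoop token.toList.reverse 0
        = token.toList.length - 1 - pvLastA token.toList := by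
      simpa [pvFirstA_reverse token.toList h] using pvFirstLoop_eq token.toList.reverse hrevany 0
    have hlt := pvLastA_lt token.toList h
    simp only [h, if_true, Bool.true_eq_false, if_false, hlead, htrail, zero_add]
    have hword : (token.toList.length : Int) - ↑(token.toList.length - 1 - pvLastA token.toList)
        = ↑(pvLastA token.toList) + 1 := by omega
    rw [hword]
    simp only [Prod.mk.injEq]
    refine ⟨trivial, trivial, ?_⟩
    by_cases ht : token.toList.length - 1 - pvLastA token.toList = 0
    · rw [if_pos ht, PySem.List.slice_from _ (by omega)]
      rw [show ((pvLastA token.toList : Int) + 1).toNat = token.toList.length by omega,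
        List.drop_length]
    · rw [if_neg ht,
        PySem.List.slice_from_neg_natCast _ _ (Nat.pos_of_ne_zero ht),
        PySem.List.slice_from _ (by omega)]
      rw [show token.toList.length - (token.toList.length - 1 - pvLastA token.toList)
            = ((pvLastA token.toList : Int) + 1).toNat by omega]
  · simp [h]
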